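-- pv_equiv track=rewrite | github.com/StanfordAHA/Halide-to-Hardware | apps/hardware_benchmarks/hw_support/generate_dw_json.py | generate_PE_name_dict
-- ===== SOURCE A (Python) =====
-- def generate_PE_name_dict(stream_connections, preload_connections):
--     # Initialize an empty dictionary to store the PE name mapping
--     PE_name_dict = {}
--
--     # Convert preload_connections to a dictionary for quick lookup of node pairs
--     preload_lookup = {}
--     for conn in preload_connections:
--         # Ensure connection is a list with exactly two elements
--         if len(conn) == 2:
--             preload_lookup[conn[0]] = conn[1]
--             preload_lookup[conn[1]] = conn[0]
--
--     # Loop through each connection in depthwise_conv_stream_dict['connections']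
--     for conn in stream_connections:
--         # Ensure each connection is a list with exactly two elements
--         if len(conn) == 2:
--             node_0, node_1 = conn[0], conn[1]
--
--             # Check if either node has both ".inst" and "float_DW_fp_mul"
--             if "float_DW_fp_mul" in node_0 and node_0.endswith(".inst"):
--                 # The other node is node_1
--                 other_node = node_1
--                 stream_PE_name = node_0  # stream_PE_name should be the original node (node_0)
--             elif "float_DW_fp_mul" in node_1 and node_1.endswith(".inst"):
--                 # The other node is node_0
--                 other_node = node_0
--                 stream_PE_name = node_1  # stream_PE_name should be the original node (node_1)
--             else:
--                 # Skip this connection if neither node matches the pattern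
--                 continue
--
--             # Find the matching node in the preload dictionary
--             if other_node in preload_lookup:
--                 preload_mapped_node = preload_lookup[other_node]
--
--                 # Remove the ".inst" suffix from both the key and value
--                 stream_PE_name = stream_PE_name.replace(".inst", "")
--                 preload_PE_name = preload_mapped_node.replace(".inst", "")
--
--                 # Add to PE_name_dict
--                 PE_name_dict[stream_PE_name] = preload_PE_name
--
--     return PE_name_dict
-- ===== SOURCE B (Python) =====
-- def _last_partner(node, preload_connections):
--     """Partner of node in the last 2-element preload connection mentioning it."""
--     partner = None
--     for p in preload_connections:
--         if len(p) == 2 and node in p: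
--             partner = p[1] if p[0] == node else p[0]
--     return partner
--
--
-- def generate_PE_name_dict(stream_connections, preload_connections):
--     # Stage 1: collect (stream PE node, neighbour) pairs from the stream connections.
--     pairs = []
--     for conn in stream_connections:
--         if len(conn) == 2:
--             for i, node in enumerate(conn):
--                 if "float_DW_fp_mul" in node and node.endswith(".inst"):
--                     pairs.append((node, conn[1 - i]))
--                     break
--     # Stage 2: resolve each neighbour against the preload connections and build the map.
--     result = {}
--     for node, other in pairs:
--         partner = _last_partner(other, preload_connections)
--         if partner is not None:
--             result[node.replace(".inst", "")] = partner.replace(".inst", "")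
--     return result
-- ===== Notes on version B (the rewrite author's own statement) =====
-- stated objective: alternative
-- what changed: Replaced the precomputed bidirectional lookup dict with a staged pipeline: first pass extracts (stream PE, neighbour) pairs via an enumerate-and-break scan, second pass resolves each neighbour by a forward scan over preload_connections that keeps the last 2-element connection mentioning it.
import Mathlib
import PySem

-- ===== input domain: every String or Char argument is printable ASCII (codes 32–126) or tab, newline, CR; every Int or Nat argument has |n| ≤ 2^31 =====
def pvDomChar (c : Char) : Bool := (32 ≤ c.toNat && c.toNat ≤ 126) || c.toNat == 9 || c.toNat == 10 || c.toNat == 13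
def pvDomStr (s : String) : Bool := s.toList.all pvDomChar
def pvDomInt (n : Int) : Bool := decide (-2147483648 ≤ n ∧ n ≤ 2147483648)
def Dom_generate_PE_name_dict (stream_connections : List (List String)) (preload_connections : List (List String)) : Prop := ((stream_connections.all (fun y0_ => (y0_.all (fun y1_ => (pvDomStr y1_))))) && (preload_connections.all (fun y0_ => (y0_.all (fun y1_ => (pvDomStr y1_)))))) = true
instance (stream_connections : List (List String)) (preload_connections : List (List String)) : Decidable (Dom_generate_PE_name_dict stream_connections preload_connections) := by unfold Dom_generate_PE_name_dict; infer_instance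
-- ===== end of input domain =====

-- B drops A's precomputed bidirectional lookup dict: it first extracts the matched
-- (stream PE, neighbour) pairs, then resolves each neighbour by a forward scan of
-- preload_connections keeping the last match (objective: alternative, same result).

-- ===== PORT A =====
-- one step of A's preload_lookup-building loop: lookup[conn[0]] = conn[1]; lookup[conn[1]] = conn[0]
def pvLookupStep (d : PySem.Dict String String) (conn : List String) : PySem.Dict String String :=
  match conn with
  | [c0, c1] => (d.insert c0 c1).insert c1 c0
  | _ => d

-- one step of A's main loop over stream_connections
def pvAStep (lookup : PySem.Dict String String) (pe : PySem.Dict String String)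
    (conn : List String) : PySem.Dict String String :=
  match conn with
  | [node0, node1] =>
    -- the branch chain computing (other_node, stream_PE_name), 'continue' = none
    let sel : Option (String × String) :=
      if PySem.Str.isIn "float_DW_fp_mul" node0 && PySem.Str.endswith node0 ".inst" then
        some (node1, node0)
      else if PySem.Str.isIn "float_DW_fp_mul" node1 && PySem.Str.endswith node1 ".inst" then
        some (node0, node1)
      else none
    match sel with
    | none => pe
    | some (other_node, stream_PE_name) =>
      match lookup.get? other_node with
      | some preload_mapped_node =>
          pe.insert (PySem.Str.replace stream_PE_name ".inst" "")
                    (PySem.Str.replace preload_mapped_node ".inst" "")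
      | none => pe
  | _ => pe

def generate_PE_name_dict (stream_connections : List (List String)) (preload_connections : List (List String)) : List (String × String) :=
  let preload_lookup := preload_connections.foldl pvLookupStep PySem.Dict.empty
  (stream_connections.foldl (pvAStep preload_lookup) PySem.Dict.empty).items

-- ===== PORT B =====
-- Source B stage-1 body for one conn: the 'for i, node in enumerate(conn): … break' loop,
-- unrolled over the two indices of a 2-element conn (conn[1-i] is the other element)
def pvPick (conn : List String) : Option (String × String) :=
  match conn with
  | [n0, n1] =>
    if PySem.Str.isIn "float_DW_fp_mul" n0 && PySem.Str.endswith n0 ".inst" then some (n0, n1)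
    else if PySem.Str.isIn "float_DW_fp_mul" n1 && PySem.Str.endswith n1 ".inst" then some (n1, n0)
    else none
  | _ => none

-- Source B _last_partner: forward scan keeping the last 2-element connection mentioning node
def pvLastPartner (node : String) (preload_connections : List (List String)) : Option String :=
  preload_connections.foldl (fun partner p =>
    match p with
    | [x, y] =>
      if node = x ∨ node = y then some (if x = node then y else x) else partner
    | _ => partner) none

def generate_PE_name_dict_alt (stream_connections : List (List String)) (preload_connections : List (List String)) : List (String × String) :=
  let pairs := stream_connections.foldl (fun acc conn =>
    match pvPick conn with
    | some pr => acc ++ [pr]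
    | none => acc) []
  (pairs.foldl (fun result (pr : String × String) =>
    match pvLastPartner pr.2 preload_connections with
    | some partner =>
        result.insert (PySem.Str.replace pr.1 ".inst" "")
                      (PySem.Str.replace partner ".inst" "")
    | none => result) PySem.Dict.empty).items

-- ===== PRECONDITION & SPEC =====
def Spec_generate_PE_name_dict (stream_connections : List (List String)) (preload_connections : List (List String)) (out : List (String × String)) : Prop := out = generate_PE_name_dict_alt stream_connections preload_connections
instance (stream_connections : List (List String)) (preload_connections : List (List String)) (out : List (String × String)) : Decidable (Spec_generate_PE_name_dict stream_connections preload_connections out) := by unfold Spec_generate_PE_name_dict; infer_instance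

-- ===== CLAIM (what is proved, stated in full; the proofs are below) =====
def Claim_equal_generate_PE_name_dict : Prop := ∀ (stream_connections : List (List String)) (preload_connections : List (List String)), Dom_generate_PE_name_dict stream_connections preload_connections → Spec_generate_PE_name_dict stream_connections preload_connections (generate_PE_name_dict stream_connections preload_connections)

-- ===== LEMMAS AND PROOFS =====

-- one step of B's scan, as a function (for stating the invariant)
def pvPStep (node : String) (partner : Option String) (p : List String) : Option String :=
  match p with
  | [x, y] => if node = x ∨ node = y then some (if x = node then y else x) else partner
  | _ => partner

-- A's lookup dict, queried at node, computes B's forward last-match scan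
theorem pvLookup_eq_scan (node : String) (pc : List (List String)) (d : PySem.Dict String String) :
    (pc.foldl pvLookupStep d).get? node = pc.foldl (pvPStep node) (d.get? node) := by
  induction pc generalizing d with
  | nil => rfl
  | cons c t ih =>
    have h : (pvLookupStep d c).get? node = pvPStep node (d.get? node) c := by
      match c with
      | [] => rfl
      | [x] => rfl
      | x :: y :: z :: r => rfl
      | [x, y] =>
        simp only [pvLookupStep, pvPStep, PySem.Dict.get?_insert]
        by_cases hx : node = x
        · subst hx
          by_cases hy : node = y
          · subst hy; simp
          · simp [hy]
        · by_cases hy : node = y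
          · subst hy
            have hx' : x ≠ node := fun h' => hx h'.symm
            simp [hx, hx']
          · simp [hx, hy]
    rw [List.foldl_cons, List.foldl_cons, ih, h]

-- pvLastPartner is that scan from none
theorem pvLastPartner_eq (node : String) (pc : List (List String)) :
    pvLastPartner node pc = pc.foldl (pvPStep node) none := by
  rfl

-- fusing B's two stages: building the pair list and then folding g over it
theorem pvFuse (g : PySem.Dict String String → (String × String) → PySem.Dict String String)
    (sc : List (List String)) (l : List (String × String)) (init : PySem.Dict String String) :
    ((sc.foldl (fun acc conn =>
        match pvPick conn with
        | some pr => acc ++ [pr]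
        | none => acc) l).foldl g init) =
      sc.foldl (fun r conn =>
        match pvPick conn with
        | some pr => g r pr
        | none => r) (l.foldl g init) := by
  induction sc generalizing l with
  | nil => rfl
  | cons c t ih =>
    rw [List.foldl_cons, List.foldl_cons, ih]
    match h : pvPick c with
    | none => rfl
    | some pr => simp [List.foldl_append]

-- A's fused step equals B's fused step
theorem pvStep_eq (pc : List (List String)) (pe : PySem.Dict String String) (conn : List String) :
    pvAStep (pc.foldl pvLookupStep PySem.Dict.empty) pe conn =
      (match pvPick conn with
       | some pr =>
         match pvLastPartner pr.2 pc with
         | some partner =>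
             pe.insert (PySem.Str.replace pr.1 ".inst" "")
                       (PySem.Str.replace partner ".inst" "")
         | none => pe
       | none => pe) := by
  match conn with
  | [] => rfl
  | [a] => rfl
  | a :: b :: c :: r => rfl
  | [a, b] =>
    simp only [pvAStep, pvPick]
    by_cases ha : (PySem.Str.isIn "float_DW_fp_mul" a && PySem.Str.endswith a ".inst") = true
    · rw [if_pos ha, if_pos ha]
      simp only [pvLookup_eq_scan, PySem.Dict.get?_empty, pvLastPartner_eq]
    · rw [if_neg ha, if_neg ha]
      by_cases hb : (PySem.Str.isIn "float_DW_fp_mul" b && PySem.Str.endswith b ".inst") = true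
      · rw [if_pos hb, if_pos hb]
        simp only [pvLookup_eq_scan, PySem.Dict.get?_empty, pvLastPartner_eq]
      · rw [if_neg hb, if_neg hb]

-- ===== VERDICT (by name: the statement is the Claim_ definition above) =====
theorem generate_PE_name_dict_spec : Claim_equal_generate_PE_name_dict := by
  intro sc pc _
  simp only [Spec_generate_PE_name_dict, generate_PE_name_dict, generate_PE_name_dict_alt]
  rw [pvFuse]
  congr 1
  apply PySem.List.foldl_congr_mem
  intro pe conn _
  rw [pvStep_eq]
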